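-- pv_equiv track=rewrite | github.com/ssyuzev/exercises | 015.py | solution
-- ===== SOURCE A (Python) =====
-- from math import comb
--
-- def solution(arr):
--     n=len(arr)
--     if arr[1]!=arr[0]:
--         l=2
--
--     else:
--         l=0
--
--     pre = arr[1] - arr[0]
--     ans=0
--
--     for i in range(2,n):
--         cur=arr[i] - arr[i-1]
--
--         if cur*pre<0:
--             l+=1
--         else:
--             if l==2:
--                 ans+=1
--             elif l==0:
--                 ans+=0
--             else:
--                 ans+=comb(l,2)
--             if cur!=0:
--                 l=2
--             else:
--                 l=0
--         pre=cur
--     if l==2: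
--         ans+=1
--     elif l==0:
--         ans+=0
--     else:
--         ans+=comb(l,2)
--     return ans
-- ===== SOURCE B (Python) =====
-- def solution(arr):
--     ans = 0
--     inc = dec = 1
--     for i in range(1, len(arr)):
--         if arr[i] > arr[i - 1]:
--             inc, dec = dec + 1, 1
--         elif arr[i] < arr[i - 1]:
--             inc, dec = 1, inc + 1
--         else:
--             inc = dec = 1
--         ans += max(inc, dec) - 1
--     return ans
-- ===== Notes on version B (the rewrite author's own statement) =====
-- stated objective: idiomatic
-- what changed: B replaces A's run-length bookkeeping with batched comb(l,2) payouts at run breaks by the standard turbulence DP (inc/dec run lengths per ending index, adding max(inc,dec)-1 after each step); same O(n) cost.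
-- outside the precondition, e.g. on solution([1]): A raises IndexError, B returns 0
import Mathlib
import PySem

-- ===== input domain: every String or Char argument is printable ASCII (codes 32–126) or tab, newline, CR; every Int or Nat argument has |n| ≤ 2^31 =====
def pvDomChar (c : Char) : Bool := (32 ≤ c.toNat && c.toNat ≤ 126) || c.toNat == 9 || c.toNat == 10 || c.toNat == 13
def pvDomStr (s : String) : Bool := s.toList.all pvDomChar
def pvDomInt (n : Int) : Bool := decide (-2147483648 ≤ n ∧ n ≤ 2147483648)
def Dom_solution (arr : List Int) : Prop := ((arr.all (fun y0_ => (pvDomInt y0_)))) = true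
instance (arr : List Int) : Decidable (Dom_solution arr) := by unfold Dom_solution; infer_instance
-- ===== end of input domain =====

-- B replaces A's batched comb(l,2) payouts at run breaks with the standard turbulence DP
-- (inc/dec run lengths per ending index, adding max(inc,dec)-1 each step); objective: idiomatic.


-- ===== PORT A =====
-- comb(l, 2); A only calls it with l ≥ 0
def pvComb (l : Int) : Int := (Nat.choose l.toNat 2 : Int)

-- A's loop body on state (l, pre, ans), given arr[i-1] and arr[i]
def pvStepA (s : Int × Int × Int) (v x : Int) : Int × Int × Int :=
  let l := s.1; let pre := s.2.1; let ans := s.2.2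
  let cur := x - v
  if cur * pre < 0 then (l + 1, cur, ans)
  else
    let ans := if l = 2 then ans + 1 else if l = 0 then ans + 0 else ans + pvComb l
    ((if cur ≠ 0 then (2:Int) else 0), cur, ans)

def solution (arr : List Int) : Int :=
  let n : Int := arr.length
  let a1 := PySem.List.pyGetD arr 1 0
  let a0 := PySem.List.pyGetD arr 0 0
  let l : Int := if a1 ≠ a0 then 2 else 0
  let pre : Int := a1 - a0
  let st := (PySem.List.pyRange 2 n 1).foldl
    (fun s i => pvStepA s (PySem.List.pyGetD arr (i - 1) 0) (PySem.List.pyGetD arr i 0)) (l, pre, 0)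
  if st.1 = 2 then st.2.2 + 1 else if st.1 = 0 then st.2.2 + 0 else st.2.2 + pvComb st.1

-- ===== PORT B =====
-- B's loop body on state (ans, inc, dec), given arr[i-1] and arr[i]
def pvStepB (s : Int × Int × Int) (v x : Int) : Int × Int × Int :=
  let ans := s.1; let inc := s.2.1; let dec := s.2.2
  let id2 : Int × Int := if x > v then (dec + 1, 1) else if x < v then (1, inc + 1) else (1, 1)
  (ans + max id2.1 id2.2 - 1, id2.1, id2.2)

def solution_alt (arr : List Int) : Int :=
  let st := (PySem.List.pyRange 1 (arr.length : Int) 1).foldl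
    (fun s i => pvStepB s (PySem.List.pyGetD arr (i - 1) 0) (PySem.List.pyGetD arr i 0)) (0, 1, 1)
  st.1

-- ===== PRECONDITION & SPEC =====
-- A indexes arr[1] unconditionally, so it raises IndexError on every list of length < 2;
-- Pre_ excludes exactly those inputs (B's loop is simply empty there).
def Pre_solution (arr : List Int) : Prop := 2 ≤ arr.length
instance (arr : List Int) : Decidable (Pre_solution arr) := by unfold Pre_solution; infer_instance
def pvWitness_solution : List Int := [1, 3, 2, 4]

def Spec_solution (arr : List Int) (out : Int) : Prop := out = solution_alt arr
instance (arr : List Int) (out : Int) : Decidable (Spec_solution arr out) := by unfold Spec_solution; infer_instance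

-- ===== CLAIM (what is proved, stated in full; the proofs are below) =====
def Claim_equal_solution : Prop := ∀ (arr : List Int), Dom_solution arr → Pre_solution arr → Spec_solution arr (solution arr)

-- ===== LEMMAS AND PROOFS =====

-- generic shape of both loops: a fold over range(k+1, n) whose body reads arr[i-1] and arr[i]
def pvGo {S : Type} (f : S → Int → Int → S) : List Int → Int → S → S
  | [], _, s => s
  | x :: r, v, s => pvGo f r x (f s v x)

theorem pvFoldAdj {S : Type} (f : S → Int → Int → S) (xs : List Int) :
    ∀ (m k : Nat) (s : S), xs.length - (k + 1) = m → k < xs.length →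
    (PySem.List.pyRange ((k : Int) + 1) (xs.length : Int) 1).foldl
      (fun s i => f s (PySem.List.pyGetD xs (i - 1) 0) (PySem.List.pyGetD xs i 0)) s
    = pvGo f (xs.drop (k + 1)) (xs.getD k 0) s := by
  intro m
  induction m with
  | zero =>
      intro k s hm hk
      have hlen : xs.length ≤ k + 1 := by omega
      rw [PySem.List.pyRange_one_eq_nil (by exact_mod_cast hlen), List.drop_eq_nil_of_le hlen]
      rfl
  | succ m ih =>
      intro k s hm hk
      have hlt : k + 1 < xs.length := by omega
      rw [PySem.List.pyRange_one_cons (by exact_mod_cast hlt)]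
      simp only [List.foldl_cons]
      have e1 : ((k : Int) + 1 - 1) = (k : Int) := by ring
      have e2 : ((k : Int) + 1) = ((k + 1 : Nat) : Int) := by push_cast; ring
      rw [e1, e2, PySem.List.pyGetD_natCast, PySem.List.pyGetD_natCast,
        ih (k + 1) _ (by omega) hlt,
        List.drop_eq_getElem_cons hlt]
      have : xs.getD (k + 1) 0 = xs[k + 1] := List.getD_eq_getElem xs 0 hlt
      rw [this]
      rfl

theorem pvComb_zero : pvComb 0 = 0 := by decide
theorem pvComb_two : pvComb 2 = 1 := by decide
theorem pvComb_succ (l : Int) (h : 0 ≤ l) : pvComb (l + 1) = pvComb l + l := by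
  unfold pvComb
  have h1 : (l + 1).toNat = l.toNat + 1 := by omega
  rw [h1, Nat.choose_succ_succ]
  have : l.toNat.choose 1 = l.toNat := Nat.choose_one_right _
  rw [this]
  push_cast
  rw [Int.toNat_of_nonneg h]
  ring

theorem pvFlush_eq (l ans : Int) (h : l = 0 ∨ 2 ≤ l) :
    (if l = 2 then ans + 1 else if l = 0 then ans + 0 else ans + pvComb l) = ans + pvComb l := by
  rcases h with h | h
  · subst h; simp [pvComb_zero]
  · by_cases h2 : l = 2
    · subst h2; rw [pvComb_two]; norm_num
    · rw [if_neg h2, if_neg (by omega)]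

-- invariant tying A's (l, pre, ans) to B's (ansB, inc, dec)
def pvInv (l pre ans ansB inc dec : Int) : Prop :=
  ansB = ans + pvComb l ∧
    ((0 < pre ∧ 2 ≤ l ∧ inc = l ∧ dec = 1) ∨
     (pre < 0 ∧ 2 ≤ l ∧ dec = l ∧ inc = 1) ∨
     (pre = 0 ∧ l = 0 ∧ inc = 1 ∧ dec = 1))

theorem pvMain : ∀ (rest : List Int) (v l pre ans ansB inc dec : Int),
    pvInv l pre ans ansB inc dec →
    (pvGo pvStepB rest v (ansB, inc, dec)).1 =
      (let st := pvGo pvStepA rest v (l, pre, ans)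
       if st.1 = 2 then st.2.2 + 1 else if st.1 = 0 then st.2.2 + 0 else st.2.2 + pvComb st.1) := by
  intro rest
  induction rest with
  | nil =>
      intro v l pre ans ansB inc dec hinv
      obtain ⟨hans, hcase⟩ := hinv
      simp only [pvGo]
      rw [pvFlush_eq l ans (by rcases hcase with ⟨_,h,_⟩|⟨_,h,_⟩|⟨_,h,_⟩ <;> omega)]
      exact hans
  | cons x r ih =>
      intro v l pre ans ansB inc dec hinv
      obtain ⟨hans, hcase⟩ := hinv
      simp only [pvGo]
      rcases lt_trichotomy (x - v) 0 with hc | hc | hc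
      · -- cur < 0, i.e. x < v
        rcases hcase with ⟨hp, hl, hi, hd⟩ | ⟨hp, hl, hd, hi⟩ | ⟨hp, hl, hi, hd⟩
        · -- pre > 0: alternation continues, A extends run
          have hA : pvStepA (l, pre, ans) v x = (l + 1, x - v, ans) := by
            simp only [pvStepA]; rw [if_pos (by nlinarith)]
          have hB : pvStepB (ansB, inc, dec) v x = (ansB + l, 1, l + 1) := by
            simp only [pvStepB, Prod.mk.injEq, max_def]
            split_ifs <;> norm_num <;> omega
          rw [hA, hB]
          exact ih x _ _ _ _ _ _ ⟨by rw [hans, pvComb_succ l (by omega)]; ring,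
            Or.inr (Or.inl ⟨by omega, by omega, rfl, rfl⟩)⟩
        · -- pre < 0: run breaks, A pays out and restarts with l = 2
          have hA : pvStepA (l, pre, ans) v x =
              (2, x - v, if l = 2 then ans + 1 else if l = 0 then ans + 0 else ans + pvComb l) := by
            simp only [pvStepA]
            rw [if_neg (by nlinarith), if_pos (by omega)]
          have hB : pvStepB (ansB, inc, dec) v x = (ansB + 1, 1, 2) := by
            simp only [pvStepB, Prod.mk.injEq, max_def]
            split_ifs <;> norm_num <;> omega
          rw [hA, hB]
          refine ih x _ _ _ _ _ _ ⟨?_, Or.inr (Or.inl ⟨by omega, by omega, rfl, rfl⟩)⟩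
          rw [pvFlush_eq l ans (by omega), hans, pvComb_two]
        · -- pre = 0 (so l = 0): A restarts with l = 2
          have hA : pvStepA (l, pre, ans) v x =
              (2, x - v, if l = 2 then ans + 1 else if l = 0 then ans + 0 else ans + pvComb l) := by
            simp only [pvStepA]
            rw [if_neg (by rw [hp]; simp), if_pos (by omega)]
          have hB : pvStepB (ansB, inc, dec) v x = (ansB + 1, 1, 2) := by
            simp only [pvStepB, Prod.mk.injEq, max_def]
            split_ifs <;> norm_num <;> omega
          rw [hA, hB]
          refine ih x _ _ _ _ _ _ ⟨?_, Or.inr (Or.inl ⟨by omega, by omega, rfl, rfl⟩)⟩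
          rw [pvFlush_eq l ans (by omega), hans, hl, pvComb_zero, pvComb_two]
      · -- cur = 0, i.e. x = v: A pays out and restarts with l = 0; B resets
        have hA : pvStepA (l, pre, ans) v x =
            (0, x - v, if l = 2 then ans + 1 else if l = 0 then ans + 0 else ans + pvComb l) := by
          simp only [pvStepA]
          rw [if_neg (by rw [hc]; simp), if_neg (by simpa using hc)]
        have hB : pvStepB (ansB, inc, dec) v x = (ansB, 1, 1) := by
          simp only [pvStepB, Prod.mk.injEq, max_def]
          split_ifs <;> norm_num <;> omega
        rw [hA, hB]
        refine ih x _ _ _ _ _ _ ⟨?_, Or.inr (Or.inr ⟨by omega, rfl, rfl, rfl⟩)⟩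
        rw [pvFlush_eq l ans (by rcases hcase with ⟨_,h,_⟩|⟨_,h,_⟩|⟨_,h,_⟩ <;> omega), hans, pvComb_zero]
        ring
      · -- cur > 0, i.e. x > v
        rcases hcase with ⟨hp, hl, hi, hd⟩ | ⟨hp, hl, hd, hi⟩ | ⟨hp, hl, hi, hd⟩
        · -- pre > 0: run breaks, A restarts with l = 2
          have hA : pvStepA (l, pre, ans) v x =
              (2, x - v, if l = 2 then ans + 1 else if l = 0 then ans + 0 else ans + pvComb l) := by
            simp only [pvStepA]
            rw [if_neg (by nlinarith), if_pos (by omega)]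
          have hB : pvStepB (ansB, inc, dec) v x = (ansB + 1, 2, 1) := by
            simp only [pvStepB, Prod.mk.injEq, max_def]
            split_ifs <;> norm_num <;> omega
          rw [hA, hB]
          refine ih x _ _ _ _ _ _ ⟨?_, Or.inl ⟨by omega, by omega, rfl, rfl⟩⟩
          rw [pvFlush_eq l ans (by omega), hans, pvComb_two]
        · -- pre < 0: alternation continues, A extends run
          have hA : pvStepA (l, pre, ans) v x = (l + 1, x - v, ans) := by
            simp only [pvStepA]; rw [if_pos (by nlinarith)]
          have hB : pvStepB (ansB, inc, dec) v x = (ansB + l, l + 1, 1) := by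
            simp only [pvStepB, Prod.mk.injEq, max_def]
            split_ifs <;> norm_num <;> omega
          rw [hA, hB]
          exact ih x _ _ _ _ _ _ ⟨by rw [hans, pvComb_succ l (by omega)]; ring,
            Or.inl ⟨by omega, by omega, rfl, rfl⟩⟩
        · -- pre = 0 (so l = 0): A restarts with l = 2
          have hA : pvStepA (l, pre, ans) v x =
              (2, x - v, if l = 2 then ans + 1 else if l = 0 then ans + 0 else ans + pvComb l) := by
            simp only [pvStepA]
            rw [if_neg (by rw [hp]; simp), if_pos (by omega)]
          have hB : pvStepB (ansB, inc, dec) v x = (ansB + 1, 2, 1) := by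
            simp only [pvStepB, Prod.mk.injEq, max_def]
            split_ifs <;> norm_num <;> omega
          rw [hA, hB]
          refine ih x _ _ _ _ _ _ ⟨?_, Or.inl ⟨by omega, by omega, rfl, rfl⟩⟩
          rw [pvFlush_eq l ans (by omega), hans, hl, pvComb_zero, pvComb_two]

-- ===== VERDICT (by name: the statement is the Claim_ definition above) =====
theorem solution_spec : Claim_equal_solution := by
  intro arr _ hpre
  unfold Pre_solution at hpre
  have h0 : (0:Nat) < arr.length := by omega
  have h1 : (1:Nat) < arr.length := by omega
  have g1 : PySem.List.pyGetD arr 1 0 = arr[1] := by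
    rw [show ((1:Int)) = ((1:Nat):Int) by norm_num, PySem.List.pyGetD_natCast]
    exact List.getD_eq_getElem arr 0 h1
  have g0 : PySem.List.pyGetD arr 0 0 = arr[0] := by
    rw [show ((0:Int)) = ((0:Nat):Int) by norm_num, PySem.List.pyGetD_natCast]
    exact List.getD_eq_getElem arr 0 h0
  unfold Spec_solution solution solution_alt
  simp only [g0, g1]
  have hfA := pvFoldAdj pvStepA arr (arr.length - 2) 1
      ((if arr[1] ≠ arr[0] then (2:Int) else 0), arr[1] - arr[0], 0) (by omega) h1
  have hfB := pvFoldAdj pvStepB arr (arr.length - 1) 0 ((0:Int), 1, 1) (by omega) h0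
  rw [show ((1:Nat):Int) + 1 = 2 by norm_num] at hfA
  rw [show ((0:Nat):Int) + 1 = 1 by norm_num] at hfB
  simp only [show (1:Nat) + 1 = 2 from rfl, show (0:Nat) + 1 = 1 from rfl] at hfA hfB
  rw [hfA, hfB]
  have hdrop : arr.drop 1 = arr[1] :: arr.drop 2 := List.drop_eq_getElem_cons h1
  have hg1 : arr.getD 1 0 = arr[1] := List.getD_eq_getElem arr 0 h1
  have hg0 : arr.getD 0 0 = arr[0] := List.getD_eq_getElem arr 0 h0
  rw [hdrop, hg1, hg0]
  simp only [pvGo]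
  set a0 := arr[0] with ha0
  set a1 := arr[1] with ha1
  have hstep : pvStepB (0, 1, 1) a0 a1 =
      ((if a1 ≠ a0 then (1:Int) else 0), (if a1 > a0 then (2:Int) else 1), (if a1 < a0 then (2:Int) else 1)) := by
    simp only [pvStepB, Prod.mk.injEq, max_def]
    split_ifs <;> norm_num <;> omega
  rw [hstep]
  rw [pvMain (arr.drop 2) a1 (if a1 ≠ a0 then 2 else 0) (a1 - a0) 0
      (if a1 ≠ a0 then (1:Int) else 0) (if a1 > a0 then (2:Int) else 1) (if a1 < a0 then (2:Int) else 1) ?_]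
  constructor
  · split_ifs <;> simp [pvComb_two, pvComb_zero]
  · rcases lt_trichotomy a0 a1 with h | h | h
    · exact Or.inl ⟨by omega, by split_ifs <;> omega, by split_ifs <;> omega, by split_ifs <;> omega⟩
    · exact Or.inr (Or.inr ⟨by omega, by split_ifs <;> omega, by split_ifs <;> omega, by split_ifs <;> omega⟩)
    · exact Or.inr (Or.inl ⟨by omega, by split_ifs <;> omega, by split_ifs <;> omega, by split_ifs <;> omega⟩)
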